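-- pv_equiv track=rewrite | github.com/yuji-sgs/algo-style | アルゴリズムと設計技法/再帰/7.py | func
-- ===== SOURCE A (Python) =====
-- def func(n, l, r):
--     if l > r:
--         return []
--     elif n == 0:
--         return [[]]
--     ans = []
--     # n-1 番目の要素として l を選んだ場合
--     for x in func(n-1,l,r):
--         to = [l]
--         to.extend(x)
--         ans.append(to)
--     # l を選ばなかった場合
--     ans.extend(func(n,l+1,r))
--
--     return ans
-- ===== SOURCE B (Python) =====
-- def func(n, l, r):
--     if l > r:
--         return []
--     # dp[k] = size-k combinations (nondecreasing) drawn from [v, r], built bottom-up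
--     dp = [[[]]] + [[] for _ in range(n)]
--     for v in range(r, l - 1, -1):
--         new = [[[]]]
--         prev = [[]]
--         for old in dp[1:]:
--             prev = [[v] + x for x in prev] + old
--             new.append(prev)
--         dp = new
--     return dp[n]
-- ===== Notes on version B (the rewrite author's own statement) =====
-- stated objective: alternative
-- what changed: Replaced A's top-down double recursion (which recomputes each subproblem (k,v) once per path reaching it) by a bottom-up DP table dp[k] = combinations of size k from [v,r], sweeping v from r down to l so every subproblem is computed exactly once; on large instances both are dominated by the exponential output size.
import Mathlib
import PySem

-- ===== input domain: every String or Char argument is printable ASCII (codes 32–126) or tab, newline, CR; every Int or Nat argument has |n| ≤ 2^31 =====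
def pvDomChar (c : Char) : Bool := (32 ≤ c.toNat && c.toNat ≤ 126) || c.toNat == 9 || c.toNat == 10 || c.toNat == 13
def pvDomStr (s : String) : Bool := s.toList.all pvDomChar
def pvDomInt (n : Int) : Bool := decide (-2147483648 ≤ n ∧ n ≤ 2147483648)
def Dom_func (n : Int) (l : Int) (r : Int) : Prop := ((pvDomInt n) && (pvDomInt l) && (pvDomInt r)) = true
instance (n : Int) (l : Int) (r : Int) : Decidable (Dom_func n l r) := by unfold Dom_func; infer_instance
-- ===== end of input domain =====

-- B replaces A's top-down double recursion by a bottom-up DP table over the lower bound v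
-- (dp[k] = size-k combinations from [v,r], each subproblem built once); objective: alternative.

-- ===== PORT A =====
-- Literal port of A's recursion.  The extra `n < 0` branch is only a termination guard:
-- there Python A recurses forever (RecursionError), and those inputs are outside Pre_func.
def func (n : Int) (l : Int) (r : Int) : List (List Int) :=
  if _h1 : l > r then []
  else if _h2 : n = 0 then [[]]
  else if _h3 : n < 0 then []   -- termination guard; A diverges here (excluded by Pre_func)
  else
    -- ans = [[l] + x for x in func(n-1,l,r)]; ans.extend(func(n,l+1,r))
    ((func (n-1) l r).map (fun x => l :: x)) ++ func n (l+1) r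
termination_by (n.toNat + (r + 1 - l).toNat)
decreasing_by
  · omega
  · omega

-- ===== PORT B =====
-- inner Python loop: prev/new accumulation over dp[1:]
def funcAltInner (v : Int) (dp : List (List (List Int))) : List (List (List Int)) :=
  ((dp.tail).foldl
    (fun (st : List (List (List Int)) × List (List Int)) old =>
      let prev := (st.2.map (fun x => v :: x)) ++ old
      (st.1 ++ [prev], prev))
    ([[[]]], [[]])).1

def func_alt (n : Int) (l : Int) (r : Int) : List (List Int) :=
  if l > r then []
  else
    let dp0 : List (List (List Int)) := [[]] :: List.replicate n.toNat []
    let dp := (PySem.List.pyRange r (l - 1) (-1)).foldl (fun dp v => funcAltInner v dp) dp0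
    (PySem.List.pyGet? dp n).getD []

-- ===== PRECONDITION & SPEC =====
-- Pre_ excludes n < 0 with l ≤ r, exactly where Python A recurses forever (RecursionError).
def Pre_func (n : Int) (l : Int) (r : Int) : Prop := 0 ≤ n ∨ r < l
instance (n : Int) (l : Int) (r : Int) : Decidable (Pre_func n l r) := by unfold Pre_func; infer_instance
def pvWitness_func : Int × Int × Int := (2, 1, 3)

def Spec_func (n : Int) (l : Int) (r : Int) (out : List (List Int)) : Prop := out = func_alt n l r
instance (n : Int) (l : Int) (r : Int) (out : List (List Int)) : Decidable (Spec_func n l r out) := by unfold Spec_func; infer_instance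

-- ===== CLAIM (what is proved, stated in full; the proofs are below) =====
def Claim_equal_func : Prop := ∀ (n : Int) (l : Int) (r : Int), Dom_func n l r → Pre_func n l r → Spec_func n l r (func n l r)
-- ===== LEMMAS AND PROOFS =====

-- unfolding equations of A's port on its three live branches
theorem func_gt (n l r : Int) (h : l > r) : func n l r = [] := by
  rw [func]; simp [h]

theorem func_zero (l r : Int) (h : ¬ l > r) : func 0 l r = [[]] := by
  rw [func]; simp [h]

theorem func_step (n l r : Int) (h : ¬ l > r) (h2 : n ≠ 0) (h3 : ¬ n < 0) :
    func n l r = ((func (n-1) l r).map (fun x => l :: x)) ++ func n (l+1) r := by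
  rw [func]; simp [h, h2, h3]

-- the dp row for lower bound w, expressed through A's values
def dpRow (r w : Int) (m : Nat) : List (List (List Int)) :=
  [[]] :: (List.range m).map (fun (i : Nat) => func ((i : Int) + 1) w r)

-- the inner fold, measured against A's values: after eating the first j old-entries
-- (which hold func (i+1) (v+1) r) the state is (dp row of func · v r up to j, func j v r)
theorem inner_fold (r v : Int) (hv : ¬ v > r) : ∀ (j : Nat),
    (((List.range j).map (fun (i : Nat) => func ((i : Int) + 1) (v+1) r)).foldl
      (fun (st : List (List (List Int)) × List (List Int)) old =>
        let prev := (st.2.map (fun x => v :: x)) ++ old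
        (st.1 ++ [prev], prev))
      ([[[]]], [[]]))
    = (dpRow r v j, func (j : Int) v r) := by
  intro j
  induction j with
  | zero => simp [dpRow, func_zero _ _ hv]
  | succ j ih =>
    rw [List.range_succ, List.map_append, List.foldl_append, ih]
    have hstep : func ((j : Int) + 1) v r
        = ((func (j : Int) v r).map (fun x => v :: x)) ++ func ((j : Int) + 1) (v+1) r := by
      have := func_step ((j : Int) + 1) v r hv (by omega) (by omega)
      simpa using this
    simp [List.foldl, hstep, dpRow, List.range_succ]

-- one outer step: funcAltInner v maps the dp row for lower bound v+1 to the row for v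
theorem inner_spec (r v : Int) (hv : ¬ v > r) (m : Nat) :
    funcAltInner v (dpRow r (v+1) m) = dpRow r v m := by
  unfold funcAltInner dpRow
  simp only [List.tail_cons]
  rw [inner_fold r v hv m]
  simp [dpRow]

-- the outer fold from value v down to w turns dp row (v+1) into dp row w
theorem outer_fold (r : Int) (m : Nat) : ∀ (k : Nat) (v w : Int), v + 1 - w = (k : Int) →
    v ≤ r → w ≤ v + 1 →
    (PySem.List.pyRange v (w - 1) (-1)).foldl (fun dp x => funcAltInner x dp) (dpRow r (v+1) m)
      = dpRow r w m := by
  intro k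
  induction k with
  | zero =>
    intro v w hk hvr hwv
    have hw : w = v + 1 := by omega
    subst hw
    rw [PySem.List.pyRange_neg_one_eq_nil (by omega)]
    simp
  | succ k ih =>
    intro v w hk hvr hwv
    rw [PySem.List.pyRange_neg_one_cons (by omega : w - 1 < v)]
    simp only [List.foldl_cons]
    rw [inner_spec r v (by omega)]
    have h := ih (v - 1) w (by omega) (by omega) (by omega)
    rw [show v - 1 + 1 = v from by omega] at h
    exact h

-- initial dp equals the dp row for lower bound r+1 (all entries empty)
theorem init_dp (r : Int) (m : Nat) :
    ([[]] : List (List Int)) :: List.replicate m ([] : List (List Int)) = dpRow r (r+1) m := by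
  unfold dpRow
  congr 1
  have h : ∀ i : Nat, func ((i : Int) + 1) (r+1) r = [] := fun i => func_gt _ _ _ (by omega)
  simp [h]

-- ===== VERDICT (by name: the statement is the Claim_ definition above) =====
-- reading off entry n of the final dp row
theorem dpRow_get (r l : Int) (hlr : ¬ l > r) (m : Nat) :
    (PySem.List.pyGet? (dpRow r l m) ((m : Nat) : Int)).getD [] = func ((m : Nat) : Int) l r := by
  cases m with
  | zero => simp [dpRow, PySem.List.pyGet?, PySem.List.pyIdx?, func_zero l r hlr]
  | succ j =>
    rw [PySem.List.pyGet?_natCast]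
    simp [dpRow]

theorem func_spec : Claim_equal_func := by
  intro n l r _ hpre
  unfold Spec_func func_alt
  by_cases hlr : l > r
  · simp [hlr, func_gt n l r hlr]
  · have hn : 0 ≤ n := by
      simp only [Pre_func] at hpre
      rcases hpre with h | h
      · exact h
      · omega
    simp only [if_neg hlr]
    rw [init_dp r n.toNat,
      outer_fold r n.toNat (r + 1 - l).toNat r l (by omega) (by omega) (by omega)]
    rw [show n = ((n.toNat : Nat) : Int) from by omega]
    exact (dpRow_get r l hlr n.toNat).symm
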